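-- pv_equiv track=rewrite | github.com/adiseal/edabit-practices | Arrow Pattern.py | arrow
-- ===== SOURCE A (Python) =====
-- def arrow(n):
--     pattern = []
--
--     for i in range(1, n + 1):
--         pattern.append('>' * i)
--
--     if n % 2 == 0:
--         pattern.append('>' * n)
--
--     for i in range(n - 1, 0, -1):
--         pattern.append('>' * i)
--
--     return pattern
-- ===== SOURCE B (Python) =====
-- def arrow(n):
--     # Single pass: row i of the pattern has width min(i+1, total-i),
--     # where total = 2n (even n, duplicated peak) or 2n-1 (odd n).
--     total = 2 * n - n % 2
--     return ['>' * min(i + 1, total - i) for i in range(total)]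
-- ===== Notes on version B (the rewrite author's own statement) =====
-- stated objective: alternative
-- what changed: B replaces A's two appending loops (ascending rows, optional duplicated peak, descending rows) with a single pass over the row indices that computes each row's width by the closed form min(i+1, total-i) with total = 2n - n%2.
-- intended difference: For nonpositive even n A returns [''] because its even-case append of '>'*n emits one empty row, while B returns [], the intended empty pattern for a nonpositive arrow. — e.g. on arrow(0): A returns [""], B returns []
import Mathlib
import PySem

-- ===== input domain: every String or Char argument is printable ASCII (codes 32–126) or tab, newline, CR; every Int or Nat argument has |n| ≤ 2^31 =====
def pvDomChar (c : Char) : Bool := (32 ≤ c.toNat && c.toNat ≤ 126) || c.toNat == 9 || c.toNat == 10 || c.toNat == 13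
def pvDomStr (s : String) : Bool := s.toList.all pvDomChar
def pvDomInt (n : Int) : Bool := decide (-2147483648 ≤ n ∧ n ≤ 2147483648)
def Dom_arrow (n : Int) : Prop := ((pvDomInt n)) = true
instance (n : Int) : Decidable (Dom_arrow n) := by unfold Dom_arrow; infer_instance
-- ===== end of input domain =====

-- B replaces A's two loops with one pass over the row indices, computing each
-- row's width by the closed form min(i+1, total-i) (objective: alternative).

-- '>' * k  (Python string repetition; empty for k ≤ 0) — shared primitive of both ports
def gtTimes (k : Int) : String := String.ofList (List.replicate k.toNat '>')

-- ===== PORT A =====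
def arrow (n : Int) : List String :=
  let p1 := (PySem.List.pyRange 1 (n+1) 1).foldl (fun acc i => acc ++ [gtTimes i]) []
  let p2 := if PySem.Int.mod n 2 = 0 then p1 ++ [gtTimes n] else p1
  (PySem.List.pyRange (n-1) 0 (-1)).foldl (fun acc i => acc ++ [gtTimes i]) p2

-- ===== PORT B =====
def arrow_alt (n : Int) : List String :=
  let total := 2 * n - PySem.Int.mod n 2
  (PySem.List.pyRange 0 total 1).map (fun i => gtTimes (min (i + 1) (total - i)))

-- ===== PRECONDITION & SPEC =====
-- On nonpositive even n A returns [''] (its even-case append of '>'*n produces one empty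
-- row), while B returns [] — no rows for a nonpositive arrow, the intended value.
def D_arrow (n : Int) : Prop := n ≤ 0 ∧ PySem.Int.mod n 2 = 0
instance (n : Int) : Decidable (D_arrow n) := by unfold D_arrow; infer_instance
def Spec_arrow (n : Int) (out : List String) : Prop := ¬ D_arrow n → out = arrow_alt n
instance (n : Int) (out : List String) : Decidable (Spec_arrow n out) := by unfold Spec_arrow; infer_instance
def pvDiffWitness_arrow : Int := 0
def pvDiffWitnessOut_arrow : (List String) × (List String) := ([""], [])

-- ===== CLAIM (what is proved, stated in full; the proofs are below) =====
def Claim_unchanged_arrow : Prop := ∀ (n : Int), Dom_arrow n → Spec_arrow n (arrow n)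
def Claim_changed_arrow : Prop := Dom_arrow (pvDiffWitness_arrow) ∧ D_arrow (pvDiffWitness_arrow) ∧ arrow (pvDiffWitness_arrow) = pvDiffWitnessOut_arrow.1 ∧ arrow_alt (pvDiffWitness_arrow) = pvDiffWitnessOut_arrow.2 ∧ pvDiffWitnessOut_arrow.1 ≠ pvDiffWitnessOut_arrow.2
def Claim_exact_arrow : Prop := ∀ (n : Int), Dom_arrow n → D_arrow n → arrow n ≠ arrow_alt n

-- ===== LEMMAS AND PROOFS =====

theorem mod_two_cases (n : Int) : PySem.Int.mod n 2 = 0 ∨ PySem.Int.mod n 2 = 1 := by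
  rw [PySem.Int.mod_eq_emod_of_pos (show (0:Int) < 2 by norm_num)]
  omega

theorem arrow_eq_of_pos (n : Int) (hn : 1 ≤ n) : arrow n = arrow_alt n := by
  unfold arrow arrow_alt
  rcases mod_two_cases n with h0 | h1
  · -- even n: total = 2n, the peak row appears twice (indices n-1 and n)
    rw [h0]
    simp only [PySem.List.foldl_append_singleton_eq_map, List.nil_append,
      PySem.List.pyRange_one, PySem.List.pyRange_neg_one, sub_zero, List.map_map, if_true]
    rw [show (n + 1 - 1).toNat = n.toNat by omega,
        show (n - 1).toNat = n.toNat - 1 by omega,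
        show (2*n).toNat = n.toNat + n.toNat by omega, List.range_add,
        List.map_append, List.map_map, List.append_assoc]
    congr 1
    · refine List.map_congr_left (fun k hk => ?_)
      rw [List.mem_range] at hk
      simp only [Function.comp_apply]
      refine congrArg gtTimes ?_
      omega
    · rw [show n.toNat = (n.toNat - 1) + 1 by omega, List.range_succ_eq_map,
          List.map_cons, List.map_map]
      simp only [List.singleton_append]
      congr 1
      · simp only [Function.comp_apply]
        refine congrArg gtTimes ?_
        omega
      · refine List.map_congr_left (fun k hk => ?_)
        rw [List.mem_range] at hk
        simp only [Function.comp_apply]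
        refine congrArg gtTimes ?_
        omega
  · -- odd n: total = 2n-1, single peak row at index n-1
    rw [h1]
    simp only [if_neg (show ¬((1:Int) = 0) by norm_num),
      PySem.List.foldl_append_singleton_eq_map, List.nil_append,
      PySem.List.pyRange_one, PySem.List.pyRange_neg_one, sub_zero, List.map_map]
    rw [show (n + 1 - 1).toNat = n.toNat by omega,
        show (n - 1).toNat = n.toNat - 1 by omega,
        show (2*n - 1).toNat = n.toNat + (n.toNat - 1) by omega, List.range_add,
        List.map_append, List.map_map]
    congr 1
    · refine List.map_congr_left (fun k hk => ?_)
      rw [List.mem_range] at hk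
      simp only [Function.comp_apply]
      refine congrArg gtTimes ?_
      omega
    · refine List.map_congr_left (fun k hk => ?_)
      rw [List.mem_range] at hk
      simp only [Function.comp_apply]
      refine congrArg gtTimes ?_
      omega

theorem arrow_spec : Claim_unchanged_arrow := by
  intro n _ hD
  show arrow n = arrow_alt n
  by_cases h : 1 ≤ n
  · exact arrow_eq_of_pos n h
  · -- n ≤ 0, and (by ¬D) n is odd: both sides are []
    rcases mod_two_cases n with h0 | h1
    · exact absurd ⟨by omega, h0⟩ hD
    · unfold arrow arrow_alt
      rw [PySem.List.pyRange_one_eq_nil (show n+1 ≤ 1 by omega),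
          PySem.List.pyRange_neg_one_eq_nil (show n-1 ≤ 0 by omega), h1]
      simp [PySem.List.pyRange_one_eq_nil (show 2*n-1 ≤ (0:Int) by omega)]

theorem arrow_changed : Claim_changed_arrow := by unfold Claim_changed_arrow; decide

theorem arrow_tight : Claim_exact_arrow := by
  intro n _ hD
  obtain ⟨hn, h0⟩ := hD
  unfold arrow arrow_alt
  rw [PySem.List.pyRange_one_eq_nil (show n+1 ≤ 1 by omega),
      PySem.List.pyRange_neg_one_eq_nil (show n-1 ≤ 0 by omega), h0]
  simp [PySem.List.pyRange_one_eq_nil (show 2*n ≤ (0:Int) by omega)]
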